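-- pv_equiv track=rewrite | github.com/hendraet/ptm-visualization | protein_sequencing/data_preprocessing/ms_fragger_preprocessor.py | get_exact_indexes
-- ===== SOURCE A (Python) =====
-- def get_exact_indexes(mod_sequence: str) -> list:
--     """Get exact indexes of the modifications in the sequence."""
--     indexes = []
--     current_index = 1
--     inside_brackets = False
--     for i, char in enumerate(mod_sequence):
--         if char == '[':
--             inside_brackets = True
--         elif char == ']':
--             inside_brackets = False
--             continue
--         elif not inside_brackets and char.isalpha():
--             if i + 1 < len(mod_sequence) and mod_sequence[i + 1] == '[':
--                 indexes.append(current_index)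
--         if not inside_brackets:
--             current_index += 1
--
--     return indexes
-- ===== SOURCE B (Python) =====
-- def get_exact_indexes(mod_sequence: str) -> list:
--     """Get exact indexes of the modifications in the sequence."""
--     indexes = []
--     counter = 1
--     i = 0
--     n = len(mod_sequence)
--     while i < n:
--         c = mod_sequence[i]
--         if c == '[':
--             # skip the whole bracket span: jump past the first ']' (to the end if none)
--             j = mod_sequence.find(']', i + 1)
--             i = n if j == -1 else j + 1
--         elif c == ']':
--             # stray closer: skipped, does not count as a residue
--             i += 1
--         else:
--             if c.isalpha() and i + 1 < n and mod_sequence[i + 1] == '[':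
--                 indexes.append(counter)
--             counter += 1
--             i += 1
--     return indexes
-- ===== Notes on version B (the rewrite author's own statement) =====
-- stated objective: alternative
-- what changed: Replaces A's boolean inside-brackets flag carried through a uniform for-loop by a while loop with an explicit cursor that jumps past each whole bracket span at once (find the first ']' and skip to it), so the outside-brackets logic never sees bracketed characters.
import Mathlib
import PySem

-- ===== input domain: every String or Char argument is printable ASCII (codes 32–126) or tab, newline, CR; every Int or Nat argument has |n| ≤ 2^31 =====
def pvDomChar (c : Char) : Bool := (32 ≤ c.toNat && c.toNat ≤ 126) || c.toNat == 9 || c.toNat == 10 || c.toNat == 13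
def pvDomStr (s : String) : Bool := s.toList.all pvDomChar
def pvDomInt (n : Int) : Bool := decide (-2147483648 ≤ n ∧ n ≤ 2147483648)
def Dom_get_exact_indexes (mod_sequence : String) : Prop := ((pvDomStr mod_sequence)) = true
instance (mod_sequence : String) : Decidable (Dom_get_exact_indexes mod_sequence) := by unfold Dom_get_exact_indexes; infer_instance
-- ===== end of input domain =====

-- B replaces A's boolean inside-brackets flag state machine by a cursor that jumps
-- past each whole bracket span at once (find the first ']' and skip); same O(n) cost.

-- ===== PORT A =====
-- loop body of A's for-loop over enumerate(mod_sequence); state = (indexes, current_index, inside_brackets)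
def pvStepA (cs : List Char) (st : List Int × Int × Bool) (ic : Int × Char) : List Int × Int × Bool :=
  if ic.2 = '[' then
    -- inside_brackets := True; the trailing 'if not inside_brackets' increment cannot fire
    (st.1, st.2.1, true)
  else if ic.2 = ']' then
    -- inside_brackets := False; 'continue' skips the increment
    (st.1, st.2.1, false)
  else
    let indexes :=
      if st.2.2 = false ∧ PySem.Chars.isalpha ic.2 ∧ ic.1 + 1 < (cs.length : Int) ∧
          PySem.List.pyGet? cs (ic.1 + 1) = some '[' then st.1 ++ [st.2.1] else st.1
    if st.2.2 = false then (indexes, st.2.1 + 1, false) else (indexes, st.2.1, true)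

def get_exact_indexes (mod_sequence : String) : List Int :=
  ((PySem.List.enumerate mod_sequence.toList 0).foldl (pvStepA mod_sequence.toList) ([], 1, false)).1

-- ===== PORT B =====
-- 'not a closing bracket' — the scan predicate of mod_sequence.find(']', i+1)
def pvNotClose (c : Char) : Bool := c ≠ ']'

-- B's while loop with an explicit cursor, as structural recursion on the remaining characters;
-- mod_sequence.find(']', i+1) + jump becomes dropWhile-to-']' then drop 1.
def pvAltLoop (cs : List Char) (counter : Int) : List Int :=
  match cs with
  | [] => []
  | c :: rest =>
    if c = '[' then pvAltLoop ((rest.dropWhile pvNotClose).drop 1) counter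
    else if c = ']' then pvAltLoop rest counter
    else if PySem.Chars.isalpha c ∧ rest.head? = some '[' then
      counter :: pvAltLoop rest (counter + 1)
    else pvAltLoop rest (counter + 1)
termination_by cs.length
decreasing_by
  · have h1 := List.length_dropWhile_le pvNotClose rest
    simp only [List.length_drop, List.length_cons]
    omega
  · simp
  · simp
  · simp

def get_exact_indexes_alt (mod_sequence : String) : List Int :=
  pvAltLoop mod_sequence.toList 1

-- ===== PRECONDITION & SPEC =====
def Spec_get_exact_indexes (mod_sequence : String) (out : List Int) : Prop := out = get_exact_indexes_alt mod_sequence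
instance (mod_sequence : String) (out : List Int) : Decidable (Spec_get_exact_indexes mod_sequence out) := by unfold Spec_get_exact_indexes; infer_instance

-- ===== CLAIM (what is proved, stated in full; the proofs are below) =====
def Claim_equal_get_exact_indexes : Prop := ∀ (mod_sequence : String), Dom_get_exact_indexes mod_sequence → Spec_get_exact_indexes mod_sequence (get_exact_indexes mod_sequence)

-- ===== LEMMAS AND PROOFS =====

-- A's lookahead 'i+1 < len and s[i+1] == "["' at absolute index i = pre.length is a head? test on the suffix.
lemma pvLookahead (pre rest : List Char) (c : Char) :
    (((pre.length : Int) + 1 < ((pre ++ c :: rest).length : Int) ∧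
      PySem.List.pyGet? (pre ++ c :: rest) ((pre.length : Int) + 1) = some '[')
      ↔ rest.head? = some '[') := by
  have hcast : ((pre.length : Int) + 1) = ((pre.length + 1 : Nat) : Int) := by push_cast; ring
  rw [hcast, PySem.List.pyGet?_natCast]
  have hget : (pre ++ c :: rest)[pre.length + 1]? = rest[0]? := by
    rw [List.getElem?_append_right (by omega)]
    simp
  cases rest with
  | nil => simp only [hget]; simp
  | cons d ds =>
    simp only [hget, List.getElem?_cons_zero, List.head?_cons, List.length_append, List.length_cons]
    constructor
    · rintro ⟨_, h⟩; exact h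
    · intro h; refine ⟨by push_cast; omega, h⟩

-- step of A's loop on an ordinary character (neither '[' nor ']') from the outside-brackets state
lemma pvStepA_other (cs : List Char) (acc : List Int) (k i : Int) (c : Char)
    (hb : ¬ c = '[') (hc : ¬ c = ']') :
    pvStepA cs (acc, k, false) (i, c) =
      ((if PySem.Chars.isalpha c = true ∧ i + 1 < (cs.length : Int) ∧
            PySem.List.pyGet? cs (i + 1) = some '[' then acc ++ [k] else acc), k + 1, false) := by
  unfold pvStepA
  split_ifs <;> simp_all

-- While inside_brackets is true, A's loop changes nothing until the first ']' ; afterwards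
-- it is the outside-brackets loop on the remainder (with the matching index offset).
lemma pvInsideSkip (cs : List Char) (r : List Char) : ∀ (j : Int) (acc : List Int) (k : Int),
    (((PySem.List.enumerate r j).foldl (pvStepA cs) (acc, k, true))).1
      = (((PySem.List.enumerate ((r.dropWhile pvNotClose).drop 1)
            (j + ((r.length - ((r.dropWhile pvNotClose).drop 1).length : Nat) : Int))).foldl
          (pvStepA cs) (acc, k, false))).1 := by
  induction r with
  | nil => intro j acc k; simp [PySem.List.enumerate_nil]
  | cons c r ih =>
    intro j acc k
    by_cases hc : c = ']'
    · subst hc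
      rw [List.dropWhile_cons_of_neg (by simp [pvNotClose])]
      simp only [List.drop_succ_cons, List.drop_zero, List.length_cons]
      have hone : ((r.length + 1 - r.length : Nat) : Int) = 1 := by omega
      rw [hone, PySem.List.enumerate_cons, List.foldl_cons]
      have hstep : pvStepA cs (acc, k, true) (j, ']') = (acc, k, false) := by
        simp [pvStepA]
      rw [hstep]
    · rw [List.dropWhile_cons_of_pos (by simp [pvNotClose, hc])]
      have hstep : pvStepA cs (acc, k, true) (j, c) = (acc, k, true) := by
        by_cases hb : c = '['
        · simp [pvStepA, hb]
        · simp [pvStepA, hb, hc]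
      rw [PySem.List.enumerate_cons, List.foldl_cons, hstep, ih (j + 1) acc k]
      have hlen : ((r.dropWhile pvNotClose).drop 1).length ≤ r.length := by
        have := List.length_dropWhile_le pvNotClose r
        simp only [List.length_drop]
        omega
      have hoff : j + 1 + ((r.length - ((r.dropWhile pvNotClose).drop 1).length : Nat) : Int)
           = j + (((c :: r).length - ((r.dropWhile pvNotClose).drop 1).length : Nat) : Int) := by
        simp only [List.length_cons]
        omega
      rw [hoff]

-- Main invariant: from the outside-brackets state, A's fold over the remaining suffix appends
-- exactly what B's cursor loop produces.
lemma pvMain (cs : List Char) : ∀ (n : Nat) (rest pre : List Char), rest.length ≤ n → cs = pre ++ rest →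
    ∀ (acc : List Int) (k : Int),
    (((PySem.List.enumerate rest (pre.length : Int)).foldl (pvStepA cs) (acc, k, false))).1
      = acc ++ pvAltLoop rest k := by
  intro n
  induction n with
  | zero =>
    intro rest pre hlen _ acc k
    have : rest = [] := List.eq_nil_of_length_eq_zero (by omega)
    subst this
    simp [PySem.List.enumerate_nil, pvAltLoop]
  | succ m ih =>
    intro rest pre hlen hcs acc k
    cases rest with
    | nil => simp [PySem.List.enumerate_nil, pvAltLoop]
    | cons c r =>
      rw [PySem.List.enumerate_cons, List.foldl_cons]
      by_cases hb : c = '['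
      · subst hb
        have hstep : pvStepA cs (acc, k, false) ((pre.length : Int), '[') = (acc, k, true) := by
          simp [pvStepA]
        rw [hstep, pvInsideSkip cs r ((pre.length : Int) + 1) acc k]
        have hloop : pvAltLoop ('[' :: r) k = pvAltLoop ((r.dropWhile pvNotClose).drop 1) k := by
          simp [pvAltLoop]
        rw [hloop]
        cases hdw : r.dropWhile pvNotClose with
        | nil =>
          simp [PySem.List.enumerate_nil, pvAltLoop]
        | cons d ds =>
          simp only [List.drop_succ_cons, List.drop_zero]
          have hsplit : r.takeWhile pvNotClose ++ d :: ds = r := by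
            have h0 := List.takeWhile_append_dropWhile (p := pvNotClose) (l := r)
            rw [hdw] at h0; exact h0
          have hlenr : r.length = (r.takeWhile pvNotClose).length + 1 + ds.length := by
            conv_lhs => rw [← hsplit]
            simp only [List.length_append, List.length_cons]
            omega
          have hcs' : cs = (pre ++ '[' :: r.takeWhile pvNotClose ++ [d]) ++ ds := by
            rw [hcs]
            conv_lhs => rw [← hsplit]
            simp
          have hlen2 : ds.length ≤ m := by
            simp only [List.length_cons] at hlen; omega
          have hmain := ih ds (pre ++ '[' :: r.takeWhile pvNotClose ++ [d]) hlen2 hcs' acc k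
          have hoff : ((pre ++ '[' :: r.takeWhile pvNotClose ++ [d]).length : Int)
              = (pre.length : Int) + 1 + ((r.length - ds.length : Nat) : Int) := by
            simp only [List.length_append, List.length_cons, List.length_nil]
            omega
          rw [hoff] at hmain
          exact hmain
      · by_cases hc : c = ']'
        · subst hc
          have hstep : pvStepA cs (acc, k, false) ((pre.length : Int), ']') = (acc, k, false) := by
            simp [pvStepA]
          rw [hstep]
          have hA : pvAltLoop (']' :: r) k = pvAltLoop r k := by
            simp [pvAltLoop]
          rw [hA]
          have hcs' : cs = (pre ++ [']']) ++ r := by rw [hcs]; simp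
          have hmain := ih r (pre ++ [']']) (by simp only [List.length_cons] at hlen; omega) hcs' acc k
          have hoff : ((pre ++ [']']).length : Int) = (pre.length : Int) + 1 := by simp
          rw [hoff] at hmain
          exact hmain
        · -- ordinary character: possibly record, always count
          have hcond := pvLookahead pre r c
          rw [← hcs] at hcond
          rw [pvStepA_other cs acc k (pre.length : Int) c hb hc]
          have hif : (if PySem.Chars.isalpha c = true ∧ (pre.length : Int) + 1 < (cs.length : Int) ∧
                PySem.List.pyGet? cs ((pre.length : Int) + 1) = some '[' then acc ++ [k] else acc)
              = (if PySem.Chars.isalpha c = true ∧ r.head? = some '[' then acc ++ [k] else acc) := by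
            by_cases hcase : PySem.Chars.isalpha c = true ∧ r.head? = some '['
            · rw [if_pos ⟨hcase.1, hcond.mpr hcase.2⟩, if_pos hcase]
            · rw [if_neg (fun h => hcase ⟨h.1, hcond.mp h.2⟩), if_neg hcase]
          rw [hif]
          have hcs' : cs = (pre ++ [c]) ++ r := by rw [hcs]; simp
          have hlen' : r.length ≤ m := by simp only [List.length_cons] at hlen; omega
          have hoff : ((pre ++ [c]).length : Int) = (pre.length : Int) + 1 := by simp
          by_cases hcase : PySem.Chars.isalpha c = true ∧ r.head? = some '['
          · have hA : pvAltLoop (c :: r) k = k :: pvAltLoop r (k + 1) := by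
              simp only [pvAltLoop]
              rw [if_neg hb, if_neg hc, if_pos hcase]
            rw [if_pos hcase, hA]
            have hmain := ih r (pre ++ [c]) hlen' hcs' (acc ++ [k]) (k + 1)
            rw [hoff] at hmain
            rw [hmain]
            simp
          · have hA : pvAltLoop (c :: r) k = pvAltLoop r (k + 1) := by
              simp only [pvAltLoop]
              rw [if_neg hb, if_neg hc, if_neg hcase]
            rw [if_neg hcase, hA]
            have hmain := ih r (pre ++ [c]) hlen' hcs' acc (k + 1)
            rw [hoff] at hmain
            exact hmain

-- ===== VERDICT (by name: the statement is the Claim_ definition above) =====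
theorem get_exact_indexes_spec : Claim_equal_get_exact_indexes := by
  intro s _
  show get_exact_indexes s = get_exact_indexes_alt s
  unfold get_exact_indexes get_exact_indexes_alt
  have := pvMain s.toList s.toList.length s.toList [] (le_refl _) rfl [] 1
  simpa using this
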